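-- pv_equiv track=rewrite | github.com/GijsFiten/txgs | utils/image_utils.py | separate_image_channels
-- ===== SOURCE A (Python) =====
-- def separate_image_channels(images, input_channels):
--     if len(images) != sum(input_channels):
--         raise ValueError(f"Incompatible number of channels: {len(images):d} vs {sum(input_channels):d}")
--     image_list = []
--     curr_channel = 0
--     for num_channels in input_channels:
--         image_list.append(images[curr_channel:curr_channel+num_channels])
--         curr_channel += num_channels
--     return image_list
-- ===== SOURCE B (Python) =====
-- from itertools import islice
--
--
-- def separate_image_channels(images, input_channels):
--     if len(images) != sum(input_channels):
--         raise ValueError(f"Incompatible number of channels: {len(images):d} vs {sum(input_channels):d}")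
--     it = iter(images)
--     return [list(islice(it, num_channels)) for num_channels in input_channels]
-- ===== Notes on version B (the rewrite author's own statement) =====
-- stated objective: idiomatic
-- what changed: Replaces the running-offset positional-slicing loop with a single consuming iterator: each chunk is taken by islice from an advancing iterator, so no offsets or index arithmetic exist at all.
-- outside the precondition, e.g. on separate_image_channels([1], [2, -1]): A returns [[1], []], B raises ValueError
import Mathlib
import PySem

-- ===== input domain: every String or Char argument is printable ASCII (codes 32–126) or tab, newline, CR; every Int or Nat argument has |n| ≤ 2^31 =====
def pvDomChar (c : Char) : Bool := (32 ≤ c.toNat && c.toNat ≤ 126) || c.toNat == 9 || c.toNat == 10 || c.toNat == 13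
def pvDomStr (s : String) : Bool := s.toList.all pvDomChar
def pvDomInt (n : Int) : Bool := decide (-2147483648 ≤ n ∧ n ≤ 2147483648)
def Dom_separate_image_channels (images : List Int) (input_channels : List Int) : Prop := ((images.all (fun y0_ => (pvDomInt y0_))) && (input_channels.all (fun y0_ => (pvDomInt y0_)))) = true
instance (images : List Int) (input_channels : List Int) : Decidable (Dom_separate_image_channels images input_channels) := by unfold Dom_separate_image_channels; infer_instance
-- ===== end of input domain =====

-- B consumes the images with an advancing iterator (islice) instead of A's offset slicing; return values only.

-- ===== PORT A =====
-- Python's ValueError branch (length mismatch) is excluded by Pre_; the port returns [] there.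
def separate_image_channels (images : List Int) (input_channels : List Int) : List (List Int) :=
  if (images.length : Int) ≠ input_channels.sum then []
  else
    (input_channels.foldl
      (fun (st : List (List Int) × Int) num_channels =>
        (st.1 ++ [PySem.List.slice images (some st.2) (some (st.2 + num_channels))],
         st.2 + num_channels))
      ([], 0)).1

-- ===== PORT B =====
-- The consuming iterator: each step takes the next n elements of what remains and
-- recurses on the rest.  Exact for n ≥ 0 (islice raises on n < 0; excluded by Pre_).
def altConsume (chans : List Int) (rem : List Int) : List (List Int) :=
  match chans with
  | [] => []
  | n :: rest => rem.take n.toNat :: altConsume rest (rem.drop n.toNat)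

def separate_image_channels_alt (images : List Int) (input_channels : List Int) : List (List Int) :=
  if (images.length : Int) ≠ input_channels.sum then []
  else altConsume input_channels images

-- ===== PRECONDITION & SPEC =====
-- Pre_ excludes the length/sum mismatches (A raises ValueError) and negative channel
-- counts, on which A's overlapping backward slices are an implementation artefact and
-- B's islice raises ValueError.
def Pre_separate_image_channels (images : List Int) (input_channels : List Int) : Prop :=
  (images.length : Int) = input_channels.sum ∧ ∀ n ∈ input_channels, 0 ≤ n
instance (images : List Int) (input_channels : List Int) : Decidable (Pre_separate_image_channels images input_channels) := by unfold Pre_separate_image_channels; infer_instance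
def pvWitness_separate_image_channels : List Int × List Int := ([1, 2, 3, 4, 5], [2, 0, 3])
def Spec_separate_image_channels (images : List Int) (input_channels : List Int) (out : List (List Int)) : Prop := out = separate_image_channels_alt images input_channels
instance (images : List Int) (input_channels : List Int) (out : List (List Int)) : Decidable (Spec_separate_image_channels images input_channels out) := by unfold Spec_separate_image_channels; infer_instance

-- ===== CLAIM =====
def Claim_equal_separate_image_channels : Prop := ∀ (images : List Int) (input_channels : List Int), Dom_separate_image_channels images input_channels → Pre_separate_image_channels images input_channels → Spec_separate_image_channels images input_channels (separate_image_channels images input_channels)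

-- ===== LEMMAS AND PROOFS =====

lemma key (images : List Int) :
    ∀ (chans : List Int) (acc : List (List Int)) (curr : Int),
      0 ≤ curr → (∀ n ∈ chans, 0 ≤ n) →
      (chans.foldl
        (fun (st : List (List Int) × Int) num_channels =>
          (st.1 ++ [PySem.List.slice images (some st.2) (some (st.2 + num_channels))],
           st.2 + num_channels))
        (acc, curr)).1
      = acc ++ altConsume chans (images.drop curr.toNat) := by
  intro chans
  induction chans with
  | nil => intro acc curr _ _; simp [altConsume]
  | cons n rest ih =>
    intro acc curr hcurr hall
    have hn : 0 ≤ n := hall n (by simp)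
    rw [List.foldl_cons,
        ih _ (curr + n) (by omega) (fun m hm => hall m (by simp [hm]))]
    rw [PySem.List.slice_toNat images hcurr (by omega)]
    have h1 : (curr + n).toNat - curr.toNat = n.toNat := by omega
    have h2 : (curr + n).toNat = curr.toNat + n.toNat := by omega
    simp [altConsume, h2, List.drop_drop]

-- ===== VERDICT =====
theorem separate_image_channels_spec : Claim_equal_separate_image_channels := by
  intro images input_channels _ hpre
  unfold Spec_separate_image_channels separate_image_channels separate_image_channels_alt
  rw [if_neg (by simpa using hpre.1), if_neg (by simpa using hpre.1)]
  simpa using key images input_channels [] 0 le_rfl hpre.2
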